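-- pv_equiv track=rewrite | github.com/chengjon/mystocks | web/backend/app/core/password_policy.py | _has_consecutive_chars
-- ===== SOURCE A (Python) =====
-- def _has_consecutive_chars(password: str) -> bool:
--     """检查是否有过多连续字符"""
--     for i in range(len(password) - 2):
--         # 检查升序连续
--         if (
--             ord(password[i + 1]) - ord(password[i]) == 1
--             and ord(password[i + 2]) - ord(password[i + 1]) == 1
--         ):
--             return True
--
--         # 检查降序连续
--         if (
--             ord(password[i]) - ord(password[i + 1]) == 1
--             and ord(password[i + 1]) - ord(password[i + 2]) == 1
--         ):
--             return True
--
--     return False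
-- ===== SOURCE B (Python) =====
-- def _has_consecutive_chars(password: str) -> bool:
--     # Track the length of the current ascending and descending run of
--     # step-1 character codes; report whether any run reaches length 3.
--     best = run_up = run_down = 1
--     prev = None
--     for ch in password:
--         c = ord(ch)
--         if prev is not None:
--             run_up = run_up + 1 if c - prev == 1 else 1
--             run_down = run_down + 1 if prev - c == 1 else 1
--             best = max(best, run_up, run_down)
--         prev = c
--     return best >= 3
-- ===== Notes on version B (the rewrite author's own statement) =====
-- stated objective: alternative
-- what changed: B replaces A's sliding three-character window with early return by a single accumulator pass that maintains the lengths of the current ascending and descending step-1 runs plus the maximum run length seen, returning whether that maximum reaches 3.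
import Mathlib
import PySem

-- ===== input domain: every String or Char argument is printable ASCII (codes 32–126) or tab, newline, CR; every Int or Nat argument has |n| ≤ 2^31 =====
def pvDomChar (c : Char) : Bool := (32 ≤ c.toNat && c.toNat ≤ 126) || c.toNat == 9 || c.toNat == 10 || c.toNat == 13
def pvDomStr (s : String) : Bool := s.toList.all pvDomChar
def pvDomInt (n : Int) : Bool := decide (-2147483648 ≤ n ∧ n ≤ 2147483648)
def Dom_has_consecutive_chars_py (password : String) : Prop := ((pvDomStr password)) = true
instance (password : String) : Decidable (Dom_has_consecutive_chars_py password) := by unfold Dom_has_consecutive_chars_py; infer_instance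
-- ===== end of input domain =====

-- B keeps running ascending/descending run lengths and a maximum instead of A's three-char sliding window (alternative decomposition).

-- ===== PORT A =====
-- loop over i in range(len(password)-2), early return True -> List.any over pyRange;
-- password[i] with i always in range -> pyGetD (exact here: indices are nonneg and < length)
def has_consecutive_chars_py (password : String) : Bool :=
  let cs := password.toList
  (PySem.List.pyRange 0 ((cs.length : Int) - 2) 1).any (fun i =>
    (((PySem.List.pyGetD cs (i + 1) ' ').toNat : Int) - ((PySem.List.pyGetD cs i ' ').toNat : Int) == 1
      && ((PySem.List.pyGetD cs (i + 2) ' ').toNat : Int) - ((PySem.List.pyGetD cs (i + 1) ' ').toNat : Int) == 1)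
    || (((PySem.List.pyGetD cs i ' ').toNat : Int) - ((PySem.List.pyGetD cs (i + 1) ' ').toNat : Int) == 1
      && ((PySem.List.pyGetD cs (i + 1) ' ').toNat : Int) - ((PySem.List.pyGetD cs (i + 2) ' ').toNat : Int) == 1))

-- ===== PORT B =====
-- the loop body of Source B: state (best, run_up, run_down, prev)
def pvStepB (st : Nat × Nat × Nat × Option Int) (ch : Char) : Nat × Nat × Nat × Option Int :=
  let c : Int := ch.toNat
  match st.2.2.2 with
  | none => (st.1, st.2.1, st.2.2.1, some c)
  | some prev =>
      let ru := if c - prev == 1 then st.2.1 + 1 else 1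
      let rd := if prev - c == 1 then st.2.2.1 + 1 else 1
      (max st.1 (max ru rd), ru, rd, some c)

def has_consecutive_chars_py_alt (password : String) : Bool :=
  let st := password.toList.foldl pvStepB (1, 1, 1, none)
  decide (3 ≤ st.1)

-- ===== PRECONDITION & SPEC =====
def Spec_has_consecutive_chars_py (password : String) (out : Bool) : Prop := out = has_consecutive_chars_py_alt password
instance (password : String) (out : Bool) : Decidable (Spec_has_consecutive_chars_py password out) := by unfold Spec_has_consecutive_chars_py; infer_instance

-- ===== CLAIM (what is proved, stated in full; the proofs are below) =====
def Claim_equal_has_consecutive_chars_py : Prop := ∀ (password : String), Dom_has_consecutive_chars_py password → Spec_has_consecutive_chars_py password (has_consecutive_chars_py password)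

-- ===== LEMMAS AND PROOFS =====

-- length of the ascending-run (in original order) ending at the head of the REVERSED code list
def pvUL : List Int → Nat
  | [] => 1
  | [_] => 1
  | a :: b :: t => if a - b = 1 then pvUL (b :: t) + 1 else 1

def pvDL : List Int → Nat
  | [] => 1
  | [_] => 1
  | a :: b :: t => if b - a = 1 then pvDL (b :: t) + 1 else 1

-- best run length seen so far (over the reversed code list)
def pvBst : List Int → Nat
  | [] => 1
  | [_] => 1
  | a :: b :: t => max (pvBst (b :: t)) (max (pvUL (a :: b :: t)) (pvDL (a :: b :: t)))

-- the window predicate: some three consecutive codes step by +1 or by -1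
def pvW (r : List Int) : Prop :=
  ∃ k : Nat, ∃ h : k + 2 < r.length,
    (r[k] - r[k+1] = 1 ∧ r[k+1] - r[k+2] = 1) ∨ (r[k+1] - r[k] = 1 ∧ r[k+2] - r[k+1] = 1)

def pvCodes (l : List Char) : List Int := l.map (fun ch => (ch.toNat : Int))

lemma foldB_eq (l : List Char) :
    l.foldl pvStepB (1, 1, 1, none) =
      (pvBst (pvCodes l).reverse, pvUL (pvCodes l).reverse, pvDL (pvCodes l).reverse,
        (pvCodes l).reverse.head?) := by
  induction l using List.reverseRecOn with
  | nil => simp [pvCodes, pvBst, pvUL, pvDL]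
  | append_singleton l c ih =>
      rw [List.foldl_append]
      have hc : (pvCodes (l ++ [c])).reverse = (c.toNat : Int) :: (pvCodes l).reverse := by
        simp [pvCodes]
      rw [List.foldl_cons, List.foldl_nil, ih, hc]
      cases hr : (pvCodes l).reverse with
      | nil => simp [pvStepB, pvBst, pvUL, pvDL]
      | cons b t =>
          simp only [pvStepB, List.head?_cons]
          simp only [pvBst, pvUL, pvDL]
          by_cases h1 : (c.toNat : Int) - b = 1 <;> by_cases h2 : b - (c.toNat : Int) = 1 <;>
            simp [h1, h2]

lemma one_le_pvUL (r : List Int) : 1 ≤ pvUL r := by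
  cases r with
  | nil => simp [pvUL]
  | cons a t =>
      cases t with
      | nil => simp [pvUL]
      | cons b t' => simp only [pvUL]; split <;> omega

lemma one_le_pvDL (r : List Int) : 1 ≤ pvDL r := by
  cases r with
  | nil => simp [pvDL]
  | cons a t =>
      cases t with
      | nil => simp [pvDL]
      | cons b t' => simp only [pvDL]; split <;> omega

lemma uL_ge3_iff (a b : Int) (t : List Int) :
    3 ≤ pvUL (a :: b :: t) ↔ a - b = 1 ∧ ∃ c t', t = c :: t' ∧ b - c = 1 := by
  cases t with
  | nil =>
      simp only [pvUL]
      split <;> simp_all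
  | cons c t' =>
      have hne : (∃ c2 t2, c :: t' = c2 :: t2 ∧ b - c2 = 1) ↔ b - c = 1 := by
        constructor
        · rintro ⟨c2, t2, he, h⟩; injection he with h1 h2; subst h1; exact h
        · intro h; exact ⟨c, t', rfl, h⟩
      rw [hne]
      have hU := one_le_pvUL (c :: t')
      simp only [pvUL]
      split_ifs <;> omega

lemma dL_ge3_iff (a b : Int) (t : List Int) :
    3 ≤ pvDL (a :: b :: t) ↔ b - a = 1 ∧ ∃ c t', t = c :: t' ∧ c - b = 1 := by
  cases t with
  | nil =>
      simp only [pvDL]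
      split <;> simp_all
  | cons c t' =>
      have hne : (∃ c2 t2, c :: t' = c2 :: t2 ∧ c2 - b = 1) ↔ c - b = 1 := by
        constructor
        · rintro ⟨c2, t2, he, h⟩; injection he with h1 h2; subst h1; exact h
        · intro h; exact ⟨c, t', rfl, h⟩
      rw [hne]
      have hD := one_le_pvDL (c :: t')
      simp only [pvDL]
      split_ifs <;> omega

lemma W_cons (x : Int) (s : List Int) :
    pvW (x :: s) ↔
      (∃ b c t', s = b :: c :: t' ∧ ((x - b = 1 ∧ b - c = 1) ∨ (b - x = 1 ∧ c - b = 1))) ∨ pvW s := by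
  constructor
  · rintro ⟨k, h, hc⟩
    cases k with
    | zero =>
        left
        match s, h with
        | b :: c :: t', _ => exact ⟨b, c, t', rfl, by simpa using hc⟩
    | succ k =>
        right
        exact ⟨k, by simpa [Nat.succ_lt_succ_iff] using h, by simpa using hc⟩
  · rintro (⟨b, c, t', rfl, hc⟩ | ⟨k, h, hc⟩)
    · exact ⟨0, by simp, by simpa using hc⟩
    · exact ⟨k + 1, by simpa [Nat.succ_lt_succ_iff] using h, by simpa using hc⟩

lemma bst_iff (r : List Int) : 3 ≤ pvBst r ↔ pvW r := by
  induction r with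
  | nil => simp [pvBst, pvW]
  | cons a t ih =>
      cases t with
      | nil =>
          simp only [pvBst]
          constructor
          · omega
          · rintro ⟨k, h, _⟩; simp at h
      | cons b t' =>
          simp only [pvBst, le_max_iff, ih, W_cons a (b :: t')]
          rw [uL_ge3_iff, dL_ge3_iff]
          constructor
          · rintro (hw | ⟨h1, c, t2, rfl, h2⟩ | ⟨h1, c, t2, rfl, h2⟩)
            · right; exact hw
            · left; exact ⟨b, c, t2, rfl, Or.inl ⟨h1, h2⟩⟩
            · left; exact ⟨b, c, t2, rfl, Or.inr ⟨h1, h2⟩⟩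
          · rintro (⟨b2, c, t2, he, hc⟩ | hw)
            · injection he with hb ht; subst hb; subst ht
              rcases hc with ⟨h1, h2⟩ | ⟨h1, h2⟩
              · right; left; exact ⟨h1, c, t2, rfl, h2⟩
              · right; right; exact ⟨h1, c, t2, rfl, h2⟩
            · left; exact hw

lemma W_reverse (r : List Int) : pvW r.reverse ↔ pvW r := by
  have key : ∀ s : List Int, pvW s → pvW s.reverse := by
    rintro s ⟨k, h, hc⟩
    have hlen : s.reverse.length = s.length := s.length_reverse
    refine ⟨s.length - 3 - k, by omega, ?_⟩
    have e0 : s.reverse[s.length - 3 - k]'(by omega) = s[k + 2] := by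
      rw [List.getElem_reverse]; congr 1; omega
    have e1 : s.reverse[s.length - 3 - k + 1]'(by omega) = s[k + 1] := by
      rw [List.getElem_reverse]; congr 1; omega
    have e2 : s.reverse[s.length - 3 - k + 2]'(by omega) = s[k] := by
      rw [List.getElem_reverse]; congr 1; omega
    rw [e0, e1, e2]
    tauto
  constructor
  · intro h
    have := key _ h
    rwa [List.reverse_reverse] at this
  · exact key r

-- A = true ↔ the window predicate on the forward code list
lemma portA_iff (password : String) :
    has_consecutive_chars_py password = true ↔ pvW (pvCodes password.toList) := by
  unfold has_consecutive_chars_py pvW pvCodes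
  simp only [List.any_eq_true, PySem.List.mem_pyRange_one, Bool.or_eq_true, Bool.and_eq_true,
    beq_iff_eq, List.length_map, List.getElem_map]
  constructor
  · rintro ⟨i, ⟨h0, h1⟩, hc⟩
    refine ⟨i.toNat, by omega, ?_⟩
    rw [PySem.List.pyGetD_eq_getElem _ _ h0 (by omega),
        PySem.List.pyGetD_eq_getElem _ _ (by omega) (by omega),
        PySem.List.pyGetD_eq_getElem _ _ (by omega) (by omega)] at hc
    have e1 : (i + 1).toNat = i.toNat + 1 := by omega
    have e2 : (i + 2).toNat = i.toNat + 2 := by omega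
    simp only [e1, e2] at hc
    tauto
  · rintro ⟨k, h, hc⟩
    refine ⟨(k : Int), ⟨by omega, by omega⟩, ?_⟩
    rw [PySem.List.pyGetD_eq_getElem _ _ (by omega) (by omega),
        PySem.List.pyGetD_eq_getElem _ _ (by omega) (by omega),
        PySem.List.pyGetD_eq_getElem _ _ (by omega) (by omega)]
    have e1 : ((k : Int) + 1).toNat = k + 1 := by omega
    have e2 : ((k : Int) + 2).toNat = k + 2 := by omega
    simp only [Int.toNat_natCast, e1, e2]
    tauto

lemma portB_iff (password : String) :
    has_consecutive_chars_py_alt password = true ↔ pvW (pvCodes password.toList) := by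
  unfold has_consecutive_chars_py_alt
  rw [foldB_eq]
  simp only [decide_eq_true_eq]
  rw [bst_iff, W_reverse]

-- ===== VERDICT (by name: the statement is the Claim_ definition above) =====
theorem has_consecutive_chars_py_spec : Claim_equal_has_consecutive_chars_py := by
  intro password _
  unfold Spec_has_consecutive_chars_py
  rw [Bool.eq_iff_iff, portA_iff, portB_iff]
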